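-- pv_equiv track=rewrite | github.com/Ennead-Architects-LLP/EmployeeData | .github/scripts/handle_computer_data.py | find_employee_by_name
-- ===== SOURCE A (Python) =====
-- def find_employee_by_name(employees, name):
--     """Find employee by name (fuzzy matching)"""
--     if not name:
--         return None
--
--     name_lower = name.lower().strip()
--
--     # Exact match first
--     for emp in employees:
--         if emp.get('real_name', '').lower().strip() == name_lower:
--             return emp
--
--     # Partial match
--     for emp in employees:
--         emp_name = emp.get('real_name', '').lower().strip()
--         if name_lower in emp_name or emp_name in name_lower:
--             return emp
--
--     return None
-- ===== SOURCE B (Python) =====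
-- def find_employee_by_name(employees, name):
--     """Find employee by name (fuzzy matching): single pass, exact match wins, first partial kept as fallback."""
--     if not name:
--         return None
--     name_lower = name.lower().strip()
--     fallback = None
--     for emp in employees:
--         emp_name = emp.get('real_name', '').lower().strip()
--         if emp_name == name_lower:
--             return emp
--         if fallback is None and (name_lower in emp_name or emp_name in name_lower):
--             fallback = emp
--     return fallback
-- ===== Notes on version B (the rewrite author's own statement) =====
-- stated objective: simpler
-- what changed: Replaces A's two sequential scans (exact then partial) by one loop that returns on an exact match and remembers the first partial match in a local fallback variable returned after the loop.
import Mathlib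
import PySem

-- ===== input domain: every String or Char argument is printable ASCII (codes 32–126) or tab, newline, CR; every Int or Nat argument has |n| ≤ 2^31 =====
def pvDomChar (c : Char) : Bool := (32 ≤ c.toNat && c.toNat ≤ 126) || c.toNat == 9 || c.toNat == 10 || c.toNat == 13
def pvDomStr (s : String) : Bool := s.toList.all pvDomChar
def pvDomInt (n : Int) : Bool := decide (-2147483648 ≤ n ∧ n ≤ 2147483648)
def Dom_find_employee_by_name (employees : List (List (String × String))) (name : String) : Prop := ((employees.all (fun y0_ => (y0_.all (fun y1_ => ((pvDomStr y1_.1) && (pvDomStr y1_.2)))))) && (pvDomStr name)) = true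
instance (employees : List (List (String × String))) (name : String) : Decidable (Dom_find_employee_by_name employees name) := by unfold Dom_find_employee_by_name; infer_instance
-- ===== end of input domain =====

-- ===== PORT A =====
-- One honest line: B collapses A's two scans (exact then partial) into one loop with a fallback variable; objective: simpler.
-- emp.get('real_name', '') on an association list: first matching key, default ""
def pvGetRealName (emp : List (String × String)) : String :=
  ((emp.find? (fun kv => kv.1 == "real_name")).map Prod.snd).getD ""

-- s.lower().strip()
def pvNorm (s : String) : String := PySem.Str.strip (PySem.Str.lower s)

-- first loop of A: exact match
def pvExactScan (employees : List (List (String × String))) (nl : String) : Option (List (String × String)) :=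
  match employees with
  | [] => none
  | emp :: rest =>
      if pvNorm (pvGetRealName emp) = nl then some emp else pvExactScan rest nl

-- second loop of A: partial match
def pvPartialScan (employees : List (List (String × String))) (nl : String) : Option (List (String × String)) :=
  match employees with
  | [] => none
  | emp :: rest =>
      let empName := pvNorm (pvGetRealName emp)
      if PySem.Str.isIn nl empName || PySem.Str.isIn empName nl then some emp
      else pvPartialScan rest nl

def find_employee_by_name (employees : List (List (String × String))) (name : String) : Option (List (String × String)) :=
  if name = "" then none
  else
    let nl := pvNorm name
    match pvExactScan employees nl with
    | some e => some e
    | none => pvPartialScan employees nl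

-- ===== PORT B =====
-- single pass: return on exact match, remember the first partial match in `fallback`
def pvOnePass (employees : List (List (String × String))) (nl : String)
    (fallback : Option (List (String × String))) : Option (List (String × String)) :=
  match employees with
  | [] => fallback
  | emp :: rest =>
      let empName := pvNorm (pvGetRealName emp)
      if empName = nl then some emp
      else
        pvOnePass rest nl
          (if fallback.isNone && (PySem.Str.isIn nl empName || PySem.Str.isIn empName nl)
           then some emp else fallback)

def find_employee_by_name_alt (employees : List (List (String × String))) (name : String) : Option (List (String × String)) :=
  if name = "" then none
  else pvOnePass employees (pvNorm name) none

-- ===== PRECONDITION & SPEC =====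
def Spec_find_employee_by_name (employees : List (List (String × String))) (name : String) (out : Option (List (String × String))) : Prop := out = find_employee_by_name_alt employees name
instance (employees : List (List (String × String))) (name : String) (out : Option (List (String × String))) : Decidable (Spec_find_employee_by_name employees name out) := by unfold Spec_find_employee_by_name; infer_instance

-- ===== CLAIM (what is proved, stated in full; the proofs are below) =====
def Claim_equal_find_employee_by_name : Prop := ∀ (employees : List (List (String × String))) (name : String), Dom_find_employee_by_name employees name → Spec_find_employee_by_name employees name (find_employee_by_name employees name)

-- ===== LEMMAS AND PROOFS =====


-- loop invariant: the one-pass scan equals exact-scan, else the saved fallback, else partial-scan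
theorem pvOnePass_eq (employees : List (List (String × String))) (nl : String)
    (fallback : Option (List (String × String))) :
    pvOnePass employees nl fallback =
      match pvExactScan employees nl with
      | some e => some e
      | none => match fallback with
                | some p => some p
                | none => pvPartialScan employees nl := by
  induction employees generalizing fallback with
  | nil => cases fallback <;> simp [pvOnePass, pvExactScan, pvPartialScan]
  | cons emp rest ih =>
      simp only [pvOnePass, pvExactScan, pvPartialScan]
      by_cases h : pvNorm (pvGetRealName emp) = nl
      · simp [h]
      · simp only [h, if_false, ih]
        cases fallback <;>
          cases hp : PySem.Str.isIn nl (pvNorm (pvGetRealName emp)) ||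
              PySem.Str.isIn (pvNorm (pvGetRealName emp)) nl <;>
            cases he : pvExactScan rest nl <;> simp

-- ===== VERDICT (by name: the statement is the Claim_ definition above) =====
theorem find_employee_by_name_spec : Claim_equal_find_employee_by_name := by
  intro employees name _
  unfold Spec_find_employee_by_name find_employee_by_name find_employee_by_name_alt
  by_cases h : name = ""
  · simp [h]
  · simp only [h, if_false, pvOnePass_eq]
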